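-- pv_equiv track=rewrite | github.com/bmc/py-sqlshell | sqlshell/__init__.py | sql_statement_is_complete
-- ===== SOURCE A (Python) =====
-- from typing import Tuple, cast
--
-- def sql_statement_is_complete(s: str) -> Tuple[bool, str | None]:
--     """
--     Determine if a SQL statement is complete. Looks for a semicolon at
--     the end of the string, and no open quotes.
--
--     :param s: the possibly partial SQL statement to check
--
--     :returns: a tuple of a boolean indicating whether the statement is
--         complete, and a string containing the open quote character, if any.
--         If the open quote character is not None, then the statement has an
--         unclosed quotation (either started with a single or double quote
--         character).
--     """
--     in_quote = None
--     for c in s: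
--         if in_quote is not None:
--             if c == in_quote:
--                 in_quote = None
--         elif c in ('"', "'"):
--             in_quote = c
--
--     complete = (in_quote is None) and s.endswith(";")
--     return (complete, in_quote)
-- ===== SOURCE B (Python) =====
-- def sql_statement_is_complete(s):
--     """Skip-based scan: pair each opening quote with its closing mate via
--     str.find and jump past the quoted segment; no per-character state machine."""
--     q = None
--     i = 0
--     n = len(s)
--     while i < n:
--         c = s[i]
--         if c in ('"', "'"):
--             j = s.find(c, i + 1)
--             if j == -1:
--                 q = c
--                 break
--             i = j + 1
--         else:
--             i += 1
--     return (q is None and s.endswith(";"), q)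
-- ===== Notes on version B (the rewrite author's own statement) =====
-- stated objective: alternative
-- what changed: Replaced the per-character quote-state machine with a skip-based scan that pairs each opening quote with its closing mate via str.find, jumps past the quoted segment, and stops at the first unmatched quote.
import Mathlib
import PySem

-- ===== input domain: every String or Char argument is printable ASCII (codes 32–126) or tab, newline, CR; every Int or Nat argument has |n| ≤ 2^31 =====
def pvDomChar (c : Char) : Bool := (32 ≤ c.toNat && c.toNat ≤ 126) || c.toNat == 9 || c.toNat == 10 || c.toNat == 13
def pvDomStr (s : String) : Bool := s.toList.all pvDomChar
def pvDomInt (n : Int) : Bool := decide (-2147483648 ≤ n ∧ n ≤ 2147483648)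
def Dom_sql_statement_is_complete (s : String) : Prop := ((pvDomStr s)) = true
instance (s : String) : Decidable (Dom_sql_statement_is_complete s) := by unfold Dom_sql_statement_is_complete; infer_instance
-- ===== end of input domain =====

-- B replaces A's per-character quote-state machine with a skip-based scan that uses
-- find to jump past each complete quoted segment; return values proved identical.

-- ===== PORT A =====
-- the loop body of A: one step of the quote FSM
def pvStepA (iq : Option Char) (c : Char) : Option Char :=
  match iq with
  | some q => if c = q then none else some q
  | none => if c = '"' ∨ c = '\'' then some c else none

def sql_statement_is_complete (s : String) : Bool × Option String :=
  let in_quote := s.toList.foldl pvStepA none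
  ((in_quote.isNone && PySem.Str.endswith s ";"), in_quote.map (fun c => String.ofList [c]))

-- ===== PORT B =====
-- hand port of Python's str.find for a single character, over the remaining chars;
-- exact: 'none' stands for find's -1, 'some j' for a found index j
def pvFindChar (c : Char) : List Char → Option Nat
  | [] => none
  | x :: rest => if x = c then some 0 else (pvFindChar c rest).map (· + 1)

-- the while-loop of B, recursing on the index i (exact transcription; n - i decreases)
def pvScanB (l : List Char) (i : Nat) : Option Char :=
  if h : i < l.length then
    let c := l[i]
    if c = '"' ∨ c = '\'' then
      match pvFindChar c (l.drop (i + 1)) with   -- s.find(c, i+1); none = -1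
      | none => some c
      | some j => pvScanB l (i + 1 + j + 1)
    else pvScanB l (i + 1)
  else none
termination_by l.length - i
decreasing_by all_goals omega

def sql_statement_is_complete_alt (s : String) : Bool × Option String :=
  let q := pvScanB s.toList 0
  ((q.isNone && PySem.Str.endswith s ";"), q.map (fun c => String.ofList [c]))

-- ===== PRECONDITION & SPEC =====
def Spec_sql_statement_is_complete (s : String) (out : Bool × Option String) : Prop := out = sql_statement_is_complete_alt s
instance (s : String) (out : Bool × Option String) : Decidable (Spec_sql_statement_is_complete s out) := by unfold Spec_sql_statement_is_complete; infer_instance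

-- ===== CLAIM (what is proved, stated in full; the proofs are below) =====
def Claim_equal_sql_statement_is_complete : Prop := ∀ (s : String), Dom_sql_statement_is_complete s → Spec_sql_statement_is_complete s (sql_statement_is_complete s)

-- ===== LEMMAS AND PROOFS =====

-- while in a quote q, the FSM skips everything up to the mate located by find
theorem foldl_stepA_some (l : List Char) (q : Char) :
    l.foldl pvStepA (some q) =
      match pvFindChar q l with
      | none => some q
      | some j => (l.drop (j + 1)).foldl pvStepA none := by
  induction l with
  | nil => rfl
  | cons x rest ih =>
    by_cases hx : x = q
    · simp [pvFindChar, hx, pvStepA]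
    · simp only [List.foldl_cons, pvStepA, if_neg hx, pvFindChar, ih]
      cases hf : pvFindChar q rest with
      | none => simp
      | some j => simp

theorem findChar_lt_length (c : Char) (l : List Char) (j : Nat)
    (h : pvFindChar c l = some j) : j < l.length := by
  induction l generalizing j with
  | nil => simp [pvFindChar] at h
  | cons x rest ih =>
    simp only [pvFindChar] at h
    split at h
    · simp at h; simp [List.length_cons]; omega
    · cases hf : pvFindChar c rest with
      | none => simp [hf] at h
      | some k =>
        simp [hf] at h
        have := ih k hf
        simp [List.length_cons]; omega

-- the FSM started on the suffix from i equals B's loop from index i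
theorem foldl_eq_scanB (l : List Char) (i : Nat) :
    (l.drop i).foldl pvStepA none = pvScanB l i := by
  by_cases h : i < l.length
  · have hdrop : l.drop i = l[i] :: l.drop (i + 1) := List.drop_eq_getElem_cons h
    by_cases hq : l[i] = '"' ∨ l[i] = '\''
    · rw [pvScanB]
      simp only [dif_pos h, if_pos hq]
      rw [hdrop, List.foldl_cons]
      have hs : pvStepA none l[i] = some l[i] := by simp [pvStepA, hq]
      rw [hs, foldl_stepA_some]
      cases hf : pvFindChar l[i] (l.drop (i + 1)) with
      | none => simp
      | some j =>
        simp only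
        rw [List.drop_drop]
        have hlt := findChar_lt_length _ _ _ hf
        have harith : i + 1 + (j + 1) = i + 1 + j + 1 := by omega
        rw [harith]
        have := foldl_eq_scanB l (i + 1 + j + 1)
        exact this
    · rw [pvScanB]
      simp only [dif_pos h, if_neg hq]
      rw [hdrop, List.foldl_cons]
      have hs : pvStepA none l[i] = none := by simp [pvStepA, hq]
      rw [hs]
      exact foldl_eq_scanB l (i + 1)
  · rw [pvScanB]
    simp [dif_neg h, List.drop_eq_nil_of_le (by omega : l.length ≤ i)]
termination_by l.length - i
decreasing_by all_goals omega

-- ===== VERDICT (by name: the statement is the Claim_ definition above) =====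
theorem sql_statement_is_complete_spec : Claim_equal_sql_statement_is_complete := by
  intro s _
  unfold Spec_sql_statement_is_complete sql_statement_is_complete sql_statement_is_complete_alt
  have h := foldl_eq_scanB s.toList 0
  simp only [List.drop_zero] at h
  rw [h]
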